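-- pv_equiv track=rewrite | github.com/michaelmilleryoder/fanfiction-nlp | quote_attribution_muzny/muzny_alg.py | get_turns
-- ===== SOURCE A (Python) =====
-- def get_turns(quotes):
--
--     """ Get sets of quotations separated by some minimum window of non-quotations (here, 100) """
--
--     window=100 # words
--     lastEnd=None
--     turns=[]
--     current=[]
--     for (start,end) in quotes:
--         if lastEnd != None:
--             if start-lastEnd > window:
--                 turns.append(current)
--                 current=[]
--         current.append((start,end))
--         lastEnd=end
--     if len(current) > 0:
--         turns.append(current)
--     return turns
-- ===== SOURCE B (Python) =====
-- def get_turns(quotes):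
--     """ Get sets of quotations separated by some minimum window of non-quotations (here, 100) """
--     turns = []
--     rest = quotes
--     while rest:
--         (s, e), rest = rest[0], rest[1:]
--         group, prev = [(s, e)], e
--         while rest and rest[0][0] - prev <= 100:
--             q, rest = rest[0], rest[1:]
--             group.append(q)
--             prev = q[1]
--         turns.append(group)
--     return turns
-- ===== Notes on version B (the rewrite author's own statement) =====
-- stated objective: alternative
-- what changed: Replaces A's single pass with flag/accumulator state (lastEnd sentinel, deferred flush of current) by a nested greedy-span loop: the outer loop takes one quote to open a turn, the inner loop consumes the whole span of quotes within the window, so a turn is emitted complete and no post-loop flush or None sentinel is needed.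
import Mathlib
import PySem

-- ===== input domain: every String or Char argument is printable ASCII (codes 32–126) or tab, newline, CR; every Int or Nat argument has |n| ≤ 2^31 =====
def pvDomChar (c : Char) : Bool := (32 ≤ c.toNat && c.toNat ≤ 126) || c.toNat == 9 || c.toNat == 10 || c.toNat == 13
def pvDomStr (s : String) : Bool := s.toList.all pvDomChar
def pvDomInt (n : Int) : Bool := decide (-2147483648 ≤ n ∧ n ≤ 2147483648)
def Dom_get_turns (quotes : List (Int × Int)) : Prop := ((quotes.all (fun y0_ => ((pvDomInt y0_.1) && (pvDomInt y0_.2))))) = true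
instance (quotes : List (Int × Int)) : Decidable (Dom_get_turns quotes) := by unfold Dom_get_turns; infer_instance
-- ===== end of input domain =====

-- B replaces A's one-pass accumulator (lastEnd sentinel, deferred flush of `current`) with a
-- nested greedy-span loop that emits each turn complete; same return value, no speed claim.

-- ===== PORT A =====
-- loop body of A's `for (start,end) in quotes:` over state (lastEnd, turns, current)
def stepA (st : Option Int × List (List (Int × Int)) × List (Int × Int)) (q : Int × Int) :
    Option Int × List (List (Int × Int)) × List (Int × Int) :=
  match st with
  | (lastEnd, turns, current) =>
    let tc : List (List (Int × Int)) × List (Int × Int) :=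
      match lastEnd with
      | some le => if q.1 - le > 100 then (turns ++ [current], []) else (turns, current)
      | none => (turns, current)
    (some q.2, tc.1, tc.2 ++ [q])

-- A's trailing `if len(current) > 0: turns.append(current)`
def finA (st : Option Int × List (List (Int × Int)) × List (Int × Int)) :
    List (List (Int × Int)) :=
  if st.2.2.length > 0 then st.2.1 ++ [st.2.2] else st.2.1

def get_turns (quotes : List (Int × Int)) : List (List (Int × Int)) :=
  finA (quotes.foldl stepA (none, [], []))

-- ===== PORT B =====
-- B's inner while loop: extend `group` while the next quote is within the window of `prev`
def innerB (group : List (Int × Int)) (prev : Int) (rest : List (Int × Int)) :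
    List (Int × Int) × List (Int × Int) :=
  match rest with
  | [] => (group, [])
  | q :: rs => if q.1 - prev ≤ 100 then innerB (group ++ [q]) q.2 rs else (group, q :: rs)

theorem innerB_snd_length (group : List (Int × Int)) (prev : Int) (rest : List (Int × Int)) :
    (innerB group prev rest).2.length ≤ rest.length := by
  induction rest generalizing group prev with
  | nil => simp [innerB]
  | cons q rs ih =>
    simp only [innerB]
    split
    · exact Nat.le_trans (ih _ _) (Nat.le_succ _)
    · simp

-- B's outer while loop
def outerB (turns : List (List (Int × Int))) (rest : List (Int × Int)) :
    List (List (Int × Int)) :=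
  match rest with
  | [] => turns
  | q :: rs =>
    let gr := innerB [q] q.2 rs
    outerB (turns ++ [gr.1]) gr.2
termination_by rest.length
decreasing_by
  exact Nat.lt_succ_of_le (innerB_snd_length [q] q.2 rs)

def get_turns_alt (quotes : List (Int × Int)) : List (List (Int × Int)) :=
  outerB [] quotes

-- ===== PRECONDITION & SPEC =====
def Spec_get_turns (quotes : List (Int × Int)) (out : List (List (Int × Int))) : Prop := out = get_turns_alt quotes
instance (quotes : List (Int × Int)) (out : List (List (Int × Int))) : Decidable (Spec_get_turns quotes out) := by unfold Spec_get_turns; infer_instance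

-- ===== CLAIM (what is proved, stated in full; the proofs are below) =====
def Claim_equal_get_turns : Prop := ∀ (quotes : List (Int × Int)), Dom_get_turns quotes → Spec_get_turns quotes (get_turns quotes)

-- ===== LEMMAS AND PROOFS =====

-- Invariant: once A's state has lastEnd = some le and a nonempty current turn, the rest of A's
-- fold (plus the final flush) produces exactly B's inner span followed by B's outer loop.
theorem loop_eq (rest : List (Int × Int)) :
    ∀ (le : Int) (turns : List (List (Int × Int))) (current : List (Int × Int)),
      current ≠ [] →
      finA (rest.foldl stepA (some le, turns, current))
        = outerB (turns ++ [(innerB current le rest).1]) (innerB current le rest).2 := by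
  induction rest with
  | nil =>
    intro le turns current hc
    simp [finA, innerB, outerB, List.length_pos_iff, hc]
  | cons q rs ih =>
    intro le turns current hc
    by_cases h : q.1 - le > 100
    · have hle : ¬ (q.1 - le ≤ 100) := by omega
      simp only [List.foldl_cons, stepA, h, if_true, innerB, hle, if_false]
      rw [ih q.2 (turns ++ [current]) ([] ++ [q]) (by simp)]
      conv_rhs => rw [outerB]
      simp
    · have hle : q.1 - le ≤ 100 := by omega
      simp only [List.foldl_cons, stepA, h, if_false, innerB, hle, if_true]
      rw [ih q.2 turns (current ++ [q]) (by simp)]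

-- ===== VERDICT (by name: the statement is the Claim_ definition above) =====
theorem get_turns_spec : Claim_equal_get_turns := by
  intro quotes _
  unfold Spec_get_turns get_turns get_turns_alt
  cases quotes with
  | nil => simp [finA, outerB]
  | cons q rs =>
    simp only [List.foldl_cons, stepA]
    rw [loop_eq rs q.2 [] ([] ++ [q]) (by simp)]
    conv_rhs => rw [outerB]
    simp
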